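-- pv_equiv track=rewrite | github.com/jakdangers/algorithm | programmers/문자열 밀기.py | solution
-- ===== SOURCE A (Python) =====
-- def solution(A, B):
--     if A == B:
--         return 0
--
--     length = len(A)
--     temp = [""] * length
--     for j in range(1, length):
--         for i in range(length):
--             temp[(i + j) % length] = A[i]
--         if ''.join(temp) == B:
--             return j
--
--     return -1
-- ===== SOURCE B (Python) =====
-- def solution(A, B):
--     if A == B:
--         return 0
--     n = len(A)
--     if len(B) != n or n == 0:
--         return -1
--     idx = (A + A).rfind(B, 1, 2 * n - 1)
--     return -1 if idx == -1 else n - idx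
-- ===== Notes on version B (the rewrite author's own statement) =====
-- stated objective: faster
-- what changed: B replaces A's rebuild-every-rotation double loop by a single rfind of B inside A+A (the highest occurrence index idx in [1,n-1] corresponds to the smallest right-shift n-idx).
import Mathlib
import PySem

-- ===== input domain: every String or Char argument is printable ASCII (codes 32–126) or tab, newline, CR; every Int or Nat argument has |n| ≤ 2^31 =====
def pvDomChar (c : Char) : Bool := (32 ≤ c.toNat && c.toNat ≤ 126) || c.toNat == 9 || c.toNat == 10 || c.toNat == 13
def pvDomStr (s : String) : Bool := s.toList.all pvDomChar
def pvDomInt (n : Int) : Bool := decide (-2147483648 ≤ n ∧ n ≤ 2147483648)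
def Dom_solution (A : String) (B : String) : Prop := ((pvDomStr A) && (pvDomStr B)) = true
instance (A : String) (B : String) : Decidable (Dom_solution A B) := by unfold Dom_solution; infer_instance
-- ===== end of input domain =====

-- B replaces A's rebuild-every-rotation double loop by a single rfind of B inside A+A;
-- the highest occurrence index idx ∈ [1, n-1] corresponds to the smallest right-shift n - idx.

-- ===== PORT A =====
-- inner loop 'for i in range(length): temp[(i+j) % length] = A[i]' (indices are Nat, always in range)
def solInner (a : List Char) (n j : Nat) (temp : List (List Char)) : List (List Char) :=
  (List.range n).foldl (fun t i => t.set ((i + j) % n) [a.getD i ' ']) temp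

-- outer loop 'for j in range(1, length): … if ''.join(temp) == B: return j' ; join with "" = flatten
def solLoop (a b : List Char) (n : Nat) : List Nat → List (List Char) → Int
  | [], _ => -1
  | j :: rest, temp =>
      let t := solInner a n j temp
      if t.flatten == b then (j : Int) else solLoop a b n rest t

def solution (A : String) (B : String) : Int :=
  if A == B then 0
  else
    let a := A.toList
    let n := a.length
    -- range(1, length) ; temp = [""] * length
    solLoop a B.toList n (List.range' 1 (n - 1)) (List.replicate n [])

-- ===== PORT B =====
def solution_alt (A : String) (B : String) : Int :=
  if A == B then 0
  else
    let a := A.toList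
    let b := B.toList
    let n : Int := a.length
    if b.length != a.length || n == 0 then -1
    else
      -- (A + A).rfind(B, 1, 2 * n - 1)
      let idx := PySem.Chars.rfindFrom (a ++ a) b 1 (some (2 * n - 1))
      if idx == -1 then -1 else n - idx

-- ===== PRECONDITION & SPEC =====
def Spec_solution (A : String) (B : String) (out : Int) : Prop := out = solution_alt A B
instance (A : String) (B : String) (out : Int) : Decidable (Spec_solution A B out) := by unfold Spec_solution; infer_instance

-- ===== CLAIM (what is proved, stated in full; the proofs are below) =====
def Claim_equal_solution : Prop := ∀ (A : String) (B : String), Dom_solution A B → Spec_solution A B (solution A B)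

-- ===== LEMMAS AND PROOFS =====

-- x % n for x < 2n
lemma mod_small_cases (x n : Nat) (hx : x < 2 * n) : x % n = if x < n then x else x - n := by
  split
  · exact Nat.mod_eq_of_lt (by omega)
  · rw [Nat.mod_eq_sub_mod (by omega), Nat.mod_eq_of_lt (by omega)]

lemma foldl_set_length (a : List Char) (n j : Nat) (l : List Nat) (temp : List (List Char)) :
    (l.foldl (fun t i => t.set ((i + j) % n) [a.getD i ' ']) temp).length = temp.length := by
  induction l generalizing temp with
  | nil => rfl
  | cons x xs ih => rw [List.foldl_cons, ih]; simp

-- after the first m writes, slot k holds A[(k+n-j) % n] iff that source index is < m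
lemma foldlSet_getD (a : List Char) (n j : Nat) (hj : j < n)
    (m : Nat) (temp : List (List Char)) (ht : temp.length = n)
    (k : Nat) (hk : k < n) (hm : m ≤ n) :
    ((List.range m).foldl (fun t i => t.set ((i + j) % n) [a.getD i ' ']) temp).getD k [] =
      if (k + n - j) % n < m then [a.getD ((k + n - j) % n) ' '] else temp.getD k [] := by
  induction m with
  | zero => simp
  | succ m ih =>
    have hm' : m ≤ n := by omega
    rw [List.range_succ, List.foldl_append, List.foldl_cons, List.foldl_nil]
    have hlen : ((List.range m).foldl (fun t i => t.set ((i + j) % n) [a.getD i ' ']) temp).length = n := by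
      rw [foldl_set_length]; exact ht
    have hiff : ((m + j) % n = k) ↔ ((k + n - j) % n = m) := by
      rw [mod_small_cases (m + j) n (by omega), mod_small_cases (k + n - j) n (by omega)]
      split <;> split <;> omega
    by_cases hc : (m + j) % n = k
    · rw [List.getD_eq_getElem?_getD, List.getElem?_set, if_pos hc,
        if_pos (show (m + j) % n < _ by rw [hlen]; exact Nat.mod_lt _ (by omega))]
      rw [hiff.mp hc, if_pos (by omega)]
      rfl
    · rw [List.getD_eq_getElem?_getD, List.getElem?_set, if_neg hc,
        ← List.getD_eq_getElem?_getD, ih hm']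
      have hne : (k + n - j) % n ≠ m := fun h => hc (hiff.mpr h)
      by_cases hlt : (k + n - j) % n < m
      · rw [if_pos hlt, if_pos (by omega)]
      · rw [if_neg hlt, if_neg (by omega)]

-- index k of the right-rotation list
lemma rot_getD (a : List Char) (n j k : Nat) (hn : n = a.length)
    (hj0 : 0 < j) (hj : j < n) (hk : k < n) :
    (a.drop (n - j) ++ a.take (n - j)).getD k ' ' = a.getD ((k + n - j) % n) ' ' := by
  have hdl : (a.drop (n - j)).length = j := by simp; omega
  rw [mod_small_cases (k + n - j) n (by omega)]
  by_cases hkj : k < j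
  · rw [if_pos (by omega)]
    rw [List.getD_eq_getElem?_getD, List.getElem?_append_left (by omega),
      List.getElem?_drop, ← List.getD_eq_getElem?_getD]
    congr 1
    omega
  · rw [if_neg (by omega)]
    rw [List.getD_eq_getElem?_getD, List.getElem?_append_right (by omega), hdl,
      List.getElem?_take, if_pos (by omega), ← List.getD_eq_getElem?_getD]
    congr 1
    omega

lemma solInner_eq_rot (a : List Char) (n j : Nat) (hn : n = a.length)
    (hj0 : 0 < j) (hj : j < n) (temp : List (List Char)) (ht : temp.length = n) :
    solInner a n j temp = (a.drop (n - j) ++ a.take (n - j)).map (fun c => [c]) := by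
  have hlen : (solInner a n j temp).length = n := by
    unfold solInner; rw [foldl_set_length]; exact ht
  apply List.ext_getElem
  · rw [hlen]; simp; omega
  · intro k h1 h2
    have hk : k < n := by omega
    have hgd := foldlSet_getD a n j hj n temp ht k hk (le_refl n)
    rw [if_pos (Nat.mod_lt _ (by omega))] at hgd
    have e1 : (solInner a n j temp)[k] = (solInner a n j temp).getD k [] :=
      (List.getD_eq_getElem _ _ h1).symm
    have e2 : ((a.drop (n - j) ++ a.take (n - j)).map (fun c => [c]))[k] =
        [(a.drop (n - j) ++ a.take (n - j)).getD k ' '] := by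
      rw [List.getElem_map]
      congr 1
      exact (List.getD_eq_getElem _ _ (by simpa using h2)).symm
    rw [e1, e2, rot_getD a n j k hn hj0 hj hk]
    unfold solInner
    rw [hgd]

lemma flatten_map_singleton (l : List Char) : (l.map (fun c => [c])).flatten = l := by
  induction l with
  | nil => rfl
  | cons x xs ih => simp [ih]

-- A's outer loop is the first j in js with rotation = b
lemma solLoop_eq_find (a b : List Char) (n : Nat) (hn : n = a.length) :
    ∀ (js : List Nat) (temp : List (List Char)), (∀ j ∈ js, 0 < j ∧ j < n) → temp.length = n →
    solLoop a b n js temp =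
      ((js.find? (fun j => a.drop (n - j) ++ a.take (n - j) == b)).elim (-1) (fun j => (j : Int))) := by
  intro js
  induction js with
  | nil => intro temp _ _; simp [solLoop]
  | cons j rest ih =>
    intro temp hmem ht
    have hj := hmem j (by simp)
    have hrot := solInner_eq_rot a n j hn hj.1 hj.2 temp ht
    have hflat : (solInner a n j temp).flatten = a.drop (n - j) ++ a.take (n - j) := by
      rw [hrot, flatten_map_singleton]
    rw [solLoop, List.find?_cons]
    cases hc : (a.drop (n - j) ++ a.take (n - j) == b) with
    | true => simp [hflat, hc]
    | false =>
      simp only [hflat, hc, Bool.false_eq_true, if_false]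
      exact ih _ (fun x hx => hmem x (by simp [hx]))
        (by unfold solInner; rw [foldl_set_length]; exact ht)

-- rfind.go is the last k ≤ m where sub is a prefix of s.drop k
lemma rfind_go_eq_find (s sub : List Char) (m : Nat) :
    PySem.Chars.rfind.go s sub m =
      (((List.range (m + 1)).reverse.find? (fun k => sub.isPrefixOf (s.drop k))).elim
        (-1) (fun k => (k : Int))) := by
  induction m with
  | zero =>
    simp only [PySem.Chars.rfind.go]
    by_cases hp : sub.isPrefixOf s = true <;> simp [hp]
  | succ m ih =>
    rw [PySem.Chars.rfind.go]
    rw [List.range_succ, List.reverse_append, List.reverse_singleton, List.singleton_append,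
      List.find?_cons]
    by_cases hp : sub.isPrefixOf (s.drop (m + 1)) = true
    · simp [hp]
    · simp only [hp, Bool.false_eq_true, if_false]
      exact ih

-- occurrence of b at index idx ≤ n in a++a  ↔  rotation equality
lemma pref_doubled_iff (a b : List Char) (hb : b.length = a.length) (idx : Nat)
    (hidx : idx ≤ a.length) :
    b <+: (a ++ a).drop idx ↔ b = a.drop idx ++ a.take idx := by
  have h1 : (a.take idx).length = idx := by simp; omega
  have hdrop : (a ++ a).drop idx = a.drop idx ++ a := by
    calc (a ++ a).drop idx = ((a.take idx ++ a.drop idx) ++ a).drop idx := by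
          rw [List.take_append_drop]
      _ = (a.take idx ++ (a.drop idx ++ a)).drop idx := by rw [List.append_assoc]
      _ = a.drop idx ++ a := List.drop_left' h1
  have htake : (a.drop idx ++ a).take b.length = a.drop idx ++ a.take idx := by
    rw [hb, List.take_append, List.take_of_length_le (by simp), List.length_drop,
      Nat.sub_sub_self hidx]
  rw [hdrop, List.prefix_iff_eq_take, htake]

lemma rev_range_map (m : Nat) :
    (List.range m).reverse.map (fun k => m - k) = List.range' 1 m := by
  apply List.ext_getElem
  · simp
  · intro i h1 h2
    simp only [List.getElem_map, List.getElem_reverse, List.getElem_range, List.getElem_range',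
      List.length_range]
    simp only [List.length_reverse, List.length_map, List.length_range] at h1
    omega

lemma occ_iff (a b : List Char) (n k : Nat) (hn : a.length = n) (hb : b.length = n)
    (hk : k + 2 ≤ n) :
    b <+: ((a ++ a).drop (1 + k)).take (2 * n - 1 - (1 + k)) ↔
      b = a.drop (1 + k) ++ a.take (1 + k) := by
  rw [List.prefix_take_iff, pref_doubled_iff a b (by omega) (1 + k) (by omega)]
  constructor
  · rintro ⟨h, -⟩; exact h
  · intro h; exact ⟨h, by omega⟩

lemma find?_congr_mem {α : Type} (l : List α) (p q : α → Bool)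
    (h : ∀ x ∈ l, p x = q x) : l.find? p = l.find? q := by
  induction l with
  | nil => rfl
  | cons x xs ih =>
    rw [List.find?_cons, List.find?_cons, h x (by simp)]
    split
    · rfl
    · exact ih (fun y hy => h y (by simp [hy]))

-- ===== VERDICT (by name: the statement is the Claim_ definition above) =====
theorem solution_spec : Claim_equal_solution := by
  intro A B _
  unfold Spec_solution solution solution_alt
  by_cases hAB : (A == B) = true
  · simp [hAB]
  · rw [Bool.not_eq_true] at hAB
    simp only [hAB, Bool.false_eq_true, if_false]
    generalize A.toList = a
    generalize B.toList = b
    generalize hn : a.length = n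
    by_cases h0 : n = 0
    · subst h0
      rw [show List.range' 1 (0 - 1) = [] from rfl, solLoop]
      rw [if_pos (by simp)]
    · have h0' : 0 < n := Nat.pos_of_ne_zero h0
      rw [solLoop_eq_find a b n hn.symm _ _
        (fun j hj => by simp only [List.mem_range'_1] at hj; omega) (by simp)]
      by_cases hblen : b.length = n
      · -- main case
        have hbne : (b.length != n) = false := by simp [hblen]
        rw [if_neg (by simp only [hbne, Bool.false_or, beq_iff_eq]; omega)]
        have hlen2 : (a ++ a).length = 2 * n := by simp [hn]; omega
        have hff : PySem.Chars.rfindFrom (a ++ a) b 1 (some (2 * (n : Int) - 1)) =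
            (if PySem.Chars.rfind (((a ++ a).take (2 * n - 1)).drop 1) b = -1 then (-1 : Int)
             else 1 + PySem.Chars.rfind (((a ++ a).take (2 * n - 1)).drop 1) b) := by
          simp only [PySem.Chars.rfindFrom]
          rw [hlen2]
          rw [if_neg (show ¬(((2 * n : Nat) : Int) < 2 * (n : Int) - 1) by omega)]
          rw [if_neg (show ¬(2 * (n : Int) - 1 < 0) by omega)]
          rw [if_neg (show ¬((1 : Int) < 0) by norm_num)]
          rw [if_neg (show ¬(2 * (n : Int) - 1 < (1 : Int)) by omega)]
          rw [show ((1 : Int)).toNat = 1 from rfl,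
            show ((2 * (n : Int) - 1)).toNat = 2 * n - 1 by omega]
        rw [hff]
        have hs'len : (((a ++ a).take (2 * n - 1)).drop 1).length = 2 * n - 2 := by
          simp [hlen2]; omega
        unfold PySem.Chars.rfind
        rw [hs'len, rfind_go_eq_find, show 2 * n - 2 + 1 = 2 * n - 1 by omega]
        -- the predicate on the sliced doubled string
        have hpf : ∀ k, k < 2 * n - 1 →
            (b.isPrefixOf (((((a ++ a).take (2 * n - 1)).drop 1)).drop k)) =
              (decide (k + 2 ≤ n) && (a.drop (1 + k) ++ a.take (1 + k) == b)) := by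
          intro k hklt
          have hsd : ((((a ++ a).take (2 * n - 1)).drop 1)).drop k =
              ((a ++ a).drop (1 + k)).take (2 * n - 1 - (1 + k)) := by
            rw [List.drop_drop, List.drop_take]
          rw [hsd]
          by_cases hk : k + 2 ≤ n
          · have hQ := occ_iff a b n k hn hblen hk
            rw [Bool.eq_iff_iff]
            simp only [List.isPrefixOf_iff_prefix, Bool.and_eq_true, decide_eq_true_eq,
              beq_iff_eq]
            rw [hQ]
            constructor
            · intro h; exact ⟨hk, h.symm⟩
            · rintro ⟨-, h⟩; exact h.symm
          · rw [Bool.eq_iff_iff]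
            simp only [List.isPrefixOf_iff_prefix, Bool.and_eq_true, decide_eq_true_eq,
              beq_iff_eq]
            constructor
            · intro h
              exfalso
              have hle := h.length_le
              rw [hblen] at hle
              simp only [List.length_take, List.length_drop, hlen2] at hle
              omega
            · rintro ⟨hk2, -⟩; exact absurd hk2 hk
        -- split the reversed range: indices ≥ n-1 never match
        rw [show List.range (2 * n - 1) = List.range (n - 1) ++ (List.range n).map ((n - 1) + ·) by
          rw [← List.range_add]; congr 1; omega]
        rw [List.reverse_append, List.find?_append]
        have hnone : (((List.range n).map ((n - 1) + ·)).reverse.find?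
            (fun k => b.isPrefixOf (((((a ++ a).take (2 * n - 1)).drop 1)).drop k))) = none := by
          rw [List.find?_eq_none]
          intro k hkmem
          simp only [List.mem_reverse, List.mem_map, List.mem_range] at hkmem
          obtain ⟨i, hi, hik⟩ := hkmem
          rw [hpf k (by omega), decide_eq_false (show ¬(k + 2 ≤ n) by omega),
            Bool.false_and]
          simp
        rw [hnone, Option.none_or]
        -- rewrite the predicate on [0, n-2]
        rw [show ((List.range (n - 1)).reverse.find?
              (fun k => b.isPrefixOf (((((a ++ a).take (2 * n - 1)).drop 1)).drop k))) =
            ((List.range (n - 1)).reverse.find?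
              (fun k => a.drop (1 + k) ++ a.take (1 + k) == b)) from
          find?_congr_mem _ _ _ (fun k hk => by
            simp only [List.mem_reverse, List.mem_range] at hk
            rw [hpf k (by omega), decide_eq_true (show k + 2 ≤ n by omega),
              Bool.true_and])]
        -- A's find? over range' 1 (n-1) is the same search through the index map j = n-1-k
        rw [show List.range' 1 (n - 1) = (List.range (n - 1)).reverse.map (fun k => (n - 1) - k) from
          (rev_range_map (n - 1)).symm]
        rw [List.find?_map]
        rw [show ((List.range (n - 1)).reverse.find?
              ((fun j => a.drop (n - j) ++ a.take (n - j) == b) ∘ (fun k => (n - 1) - k))) =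
            ((List.range (n - 1)).reverse.find?
              (fun k => a.drop (1 + k) ++ a.take (1 + k) == b)) from
          find?_congr_mem _ _ _ (fun k hk => by
            simp only [List.mem_reverse, List.mem_range] at hk
            simp only [Function.comp]
            rw [show n - ((n - 1) - k) = 1 + k by omega])]
        -- case on the common search result
        cases hfind : ((List.range (n - 1)).reverse.find?
            (fun k => a.drop (1 + k) ++ a.take (1 + k) == b)) with
        | none =>
          simp only [Option.map_none, Option.elim_none]
          norm_num
        | some k =>
          have hkmem := List.mem_of_find?_eq_some hfind
          simp only [List.mem_reverse, List.mem_range] at hkmem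
          simp only [Option.map_some, Option.elim_some]
          rw [if_neg (show ¬((k : Int) = -1) by omega)]
          rw [show ((1 + (k : Int)) == -1) = false from beq_eq_false_iff_ne.mpr (by omega)]
          simp only [Bool.false_eq_true, if_false]
          omega
      · -- lengths differ: no rotation can equal b, and B bails out on the length test
        rw [if_pos (by
          simp only [Bool.or_eq_true, bne_iff_ne, ne_eq]
          exact Or.inl (fun h => hblen (by omega)))]
        rw [show (List.range' 1 (n - 1)).find?
            (fun j => a.drop (n - j) ++ a.take (n - j) == b) = none from by
          rw [List.find?_eq_none]
          intro j hj
          simp only [List.mem_range'_1] at hj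
          simp only [beq_iff_eq]
          intro h
          apply hblen
          rw [← h]
          simp
          omega]
        rfl
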